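-- pv_equiv track=rewrite | github.com/kythuatdulieu/Cypher2Sql | graphiti/pipeline/reduce_sql.py | generate_candidate_perms
-- ===== SOURCE A (Python) =====
-- from collections import Counter
-- from typing import Iterable, List, Optional, Sequence, Tuple, Set
--
-- def generate_candidate_perms(sig1: Sequence[Counter], sig2: Sequence[Counter]) -> Iterable[Tuple[int, ...]]:
--     """Sinh các hoán vị phù hợp chữ ký."""
--
--     indices = list(range(len(sig1)))
--     # Chỉ giữ những ghép mà chữ ký tồn tại
--     possible_positions = []
--     for sig in sig1:
--         positions = [idx for idx, sig_other in enumerate(sig2) if sig_other == sig]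
--         if not positions:
--             return []
--         possible_positions.append(positions)
--
--     # backtracking đơn giản (giảm nhanh nhánh khi trùng lặp)
--     def backtrack(pos: int, current: List[int], used: Set[int]) -> Iterable[Tuple[int, ...]]:
--         if pos == len(indices):
--             yield tuple(current)
--             return
--         for candidate in possible_positions[pos]:
--             if candidate in used:
--                 continue
--             used.add(candidate)
--             current.append(candidate)
--             yield from backtrack(pos + 1, current, used)
--             current.pop()
--             used.remove(candidate)
--
--     return backtrack(0, [], set())
-- ===== SOURCE B (Python) =====
-- def generate_candidate_perms(sig1, sig2):
--     """Level-by-level product building: extend every partial assignment with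
--     each matching, not-yet-used index of sig2; no recursion, no shared state."""
--     results = [[]]
--     for sig in sig1:
--         results = [perm + [idx]
--                    for perm in results
--                    for idx, other in enumerate(sig2)
--                    if other == sig and idx not in perm]
--     return [tuple(p) for p in results]
-- ===== Notes on version B (the rewrite author's own statement) =====
-- stated objective: alternative
-- what changed: Replaces the recursive generator with a shared mutable current/used state by an iterative level-by-level fold that rebuilds the whole list of partial assignments at each signature, checking index reuse by membership in the partial permutation itself; the eager possible_positions preprocessing and early-return disappear (an empty match level empties the result list naturally).
import Mathlib
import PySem

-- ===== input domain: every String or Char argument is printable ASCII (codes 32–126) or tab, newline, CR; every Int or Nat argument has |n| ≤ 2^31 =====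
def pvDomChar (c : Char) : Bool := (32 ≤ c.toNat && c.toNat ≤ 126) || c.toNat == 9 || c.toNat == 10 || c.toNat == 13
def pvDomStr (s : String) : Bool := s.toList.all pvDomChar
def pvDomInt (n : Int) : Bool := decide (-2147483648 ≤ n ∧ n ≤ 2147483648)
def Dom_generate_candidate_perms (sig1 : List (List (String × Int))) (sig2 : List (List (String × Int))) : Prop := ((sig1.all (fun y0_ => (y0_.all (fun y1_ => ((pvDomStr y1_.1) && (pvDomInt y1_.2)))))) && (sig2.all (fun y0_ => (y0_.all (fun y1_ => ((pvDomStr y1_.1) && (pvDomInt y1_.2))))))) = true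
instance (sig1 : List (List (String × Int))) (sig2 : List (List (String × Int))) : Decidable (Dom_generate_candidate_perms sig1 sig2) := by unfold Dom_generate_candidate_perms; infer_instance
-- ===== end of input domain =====

-- B replaces A's recursive backtracking generator by an iterative level-by-level
-- fold that rebuilds the list of partial assignments per signature (alternative
-- decomposition, same cost class). A's return value is a generator; the
-- equivalence is about the list of yielded tuples.

-- ===== PORT A =====
-- Python dict equality (order-insensitive), used by both ports for 'sig_other == sig';
-- exact for valid dicts (no duplicate keys).
def pvDictEq (a b : List (String × Int)) : Bool :=
  (a.all (fun kv => (PySem.Dict.ofList b).get? kv.1 == some kv.2)) &&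
  (b.all (fun kv => (PySem.Dict.ofList a).get? kv.1 == some kv.2))

-- the inner comprehension: [idx for idx, sig_other in enumerate(sig2) if sig_other == sig]
def pvPositions (sig2 : List (List (String × Int))) (sig : List (String × Int)) : List Int :=
  (PySem.List.enumerate sig2 0).filterMap (fun p => if pvDictEq p.2 sig then some p.1 else none)

-- the first loop of A, with its early 'return []' modelled as none
def pvBuild (sig2 : List (List (String × Int))) : List (List (String × Int)) → Option (List (List Int))
  | [] => some []
  | sig :: rest =>
    let positions := pvPositions sig2 sig
    if positions.isEmpty then none
    else match pvBuild sig2 rest with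
      | none => none
      | some pp => some (positions :: pp)

-- A's backtrack generator: pos ↔ the consumed prefix of possible_positions
def pvBacktrack (pp : List (List Int)) (current : List Int) (used : PySem.Set Int) : List (List Int) :=
  match pp with
  | [] => [current]
  | ps :: rest =>
    ps.foldl (fun acc c =>
      if PySem.Set.contains used c then acc
      else acc ++ pvBacktrack rest (current ++ [c]) (PySem.Set.add used c)) []

def generate_candidate_perms (sig1 : List (List (String × Int))) (sig2 : List (List (String × Int))) : List (List Int) :=
  match pvBuild sig2 sig1 with
  | none => []
  | some pp => pvBacktrack pp [] PySem.Set.empty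

-- ===== PORT B =====
def generate_candidate_perms_alt (sig1 : List (List (String × Int))) (sig2 : List (List (String × Int))) : List (List Int) :=
  sig1.foldl (fun results sig =>
    results.flatMap (fun perm =>
      (PySem.List.enumerate sig2 0).filterMap (fun p =>
        if pvDictEq p.2 sig && !(perm.contains p.1) then some (perm ++ [p.1]) else none)))
    [[]]

-- ===== PRECONDITION & SPEC =====
def Spec_generate_candidate_perms (sig1 : List (List (String × Int))) (sig2 : List (List (String × Int))) (out : List (List Int)) : Prop := out = generate_candidate_perms_alt sig1 sig2
instance (sig1 : List (List (String × Int))) (sig2 : List (List (String × Int))) (out : List (List Int)) : Decidable (Spec_generate_candidate_perms sig1 sig2 out) := by unfold Spec_generate_candidate_perms; infer_instance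

-- ===== CLAIM (what is proved, stated in full; the proofs are below) =====
def Claim_equal_generate_candidate_perms : Prop := ∀ (sig1 : List (List (String × Int))) (sig2 : List (List (String × Int))), Dom_generate_candidate_perms sig1 sig2 → Spec_generate_candidate_perms sig1 sig2 (generate_candidate_perms sig1 sig2)

-- ===== LEMMAS AND PROOFS =====

-- one level of B, phrased on a precomputed position list
def pvStep (results : List (List Int)) (ps : List Int) : List (List Int) :=
  results.flatMap (fun perm => ps.filterMap (fun c => if perm.contains c then none else some (perm ++ [c])))

theorem pvStep_nil_right (results : List (List Int)) : pvStep results [] = [] := by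
  simp [pvStep]

theorem pvStep_nil_left (ps : List Int) : pvStep [] ps = [] := by
  simp [pvStep]

theorem pvStep_append (xs ys : List (List Int)) (ps : List Int) :
    pvStep (xs ++ ys) ps = pvStep xs ps ++ pvStep ys ps := by
  simp [pvStep]

theorem foldl_pvStep_nil (pp : List (List Int)) : pp.foldl pvStep [] = [] := by
  induction pp with
  | nil => rfl
  | cons ps rest ih => simpa [pvStep_nil_left] using ih

theorem foldl_pvStep_append (pp : List (List Int)) (xs ys : List (List Int)) :
    pp.foldl pvStep (xs ++ ys) = pp.foldl pvStep xs ++ pp.foldl pvStep ys := by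
  induction pp generalizing xs ys with
  | nil => rfl
  | cons ps rest ih => simpa [pvStep_append] using ih (pvStep xs ps) (pvStep ys ps)

-- the core invariant: A's DFS with the shared used-set equals B's level fold
theorem pvBacktrack_eq_foldl (pp : List (List Int)) (current : List Int) (used : PySem.Set Int)
    (h : ∀ c : Int, PySem.Set.contains used c = current.contains c) :
    pvBacktrack pp current used = pp.foldl pvStep [current] := by
  induction pp generalizing current used with
  | nil => rfl
  | cons ps rest ih =>
    have key : ∀ (cs : List Int) (acc : List (List Int)),
        cs.foldl (fun acc c =>
          if PySem.Set.contains used c then acc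
          else acc ++ pvBacktrack rest (current ++ [c]) (PySem.Set.add used c)) acc
        = acc ++ rest.foldl pvStep
            (cs.filterMap (fun c => if current.contains c then none else some (current ++ [c]))) := by
      intro cs
      induction cs with
      | nil => intro acc; simp [foldl_pvStep_nil]
      | cons c cs ihc =>
        intro acc
        by_cases hc : current.contains c = true
        · have hu : PySem.Set.contains used c = true := by rw [h]; exact hc
          simp only [List.foldl_cons, List.filterMap_cons, hu, hc, ↓reduceIte]
          exact ihc acc
        · have hc' : current.contains c = false := by simpa using hc
          have hu : PySem.Set.contains used c = false := by rw [h]; exact hc'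
          have hrec : pvBacktrack rest (current ++ [c]) (PySem.Set.add used c)
              = rest.foldl pvStep [current ++ [c]] := by
            apply ih
            intro x
            have hcn : c ∉ used := by simpa using hu
            have h' : decide (x ∈ used) = decide (x ∈ current) := by
              simpa [PySem.Set.contains, List.contains_iff_mem] using h x
            simp only [PySem.Set.add, PySem.Set.contains, List.contains_iff_mem, if_neg hcn]
            simp [List.mem_append, h']
          simp only [List.foldl_cons, List.filterMap_cons, hu, hc', Bool.false_eq_true, ↓reduceIte]
          rw [ihc, hrec]
          have hsplit : (current ++ [c]) :: (cs.filterMap (fun c => if current.contains c then none else some (current ++ [c])))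
              = [current ++ [c]] ++ (cs.filterMap (fun c => if current.contains c then none else some (current ++ [c]))) := rfl
          rw [hsplit, foldl_pvStep_append, List.append_assoc]
    show ps.foldl _ [] = _
    rw [key ps []]
    simp only [List.nil_append, List.foldl_cons]
    congr 1
    simp [pvStep]

-- B's raw level equals pvStep on the precomputed position list
theorem alt_step_eq (sig2 : List (List (String × Int))) (sig : List (String × Int))
    (results : List (List Int)) :
    results.flatMap (fun perm =>
      (PySem.List.enumerate sig2 0).filterMap (fun p =>
        if pvDictEq p.2 sig && !(perm.contains p.1) then some (perm ++ [p.1]) else none))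
    = pvStep results (pvPositions sig2 sig) := by
  unfold pvStep pvPositions
  congr 1
  funext perm
  rw [List.filterMap_filterMap]
  congr 1
  funext p
  by_cases h1 : pvDictEq p.2 sig = true
  · by_cases h2 : perm.contains p.1 = true <;> simp [h1]
  · simp [Bool.not_eq_true] at h1
    simp [h1]

theorem alt_eq_foldl (sig1 sig2 : List (List (String × Int))) (start : List (List Int)) :
    sig1.foldl (fun results sig =>
      results.flatMap (fun perm =>
        (PySem.List.enumerate sig2 0).filterMap (fun p =>
          if pvDictEq p.2 sig && !(perm.contains p.1) then some (perm ++ [p.1]) else none))) start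
    = (sig1.map (pvPositions sig2)).foldl pvStep start := by
  rw [List.foldl_map]
  have hf : (fun (results : List (List Int)) (sig : List (String × Int)) =>
      results.flatMap (fun perm =>
        (PySem.List.enumerate sig2 0).filterMap (fun p =>
          if pvDictEq p.2 sig && !(perm.contains p.1) then some (perm ++ [p.1]) else none)))
      = fun results sig => pvStep results (pvPositions sig2 sig) := by
    funext results sig
    exact alt_step_eq sig2 sig results
  rw [hf]

theorem build_some (sig2 : List (List (String × Int))) :
    ∀ (sig1 : List (List (String × Int))) (pp : List (List Int)),
    pvBuild sig2 sig1 = some pp → pp = sig1.map (pvPositions sig2) := by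
  intro sig1
  induction sig1 with
  | nil => intro pp h; simp [pvBuild] at h; simp [← h]
  | cons sig rest ih =>
    intro pp h
    simp only [pvBuild] at h
    by_cases he : (pvPositions sig2 sig).isEmpty = true
    · simp [he] at h
    · simp only [he, Bool.false_eq_true, ite_false] at h
      cases hr : pvBuild sig2 rest with
      | none => rw [hr] at h; simp at h
      | some pq => rw [hr] at h; simp at h; simp [← h, ih pq hr]

theorem build_none (sig2 : List (List (String × Int))) :
    ∀ (sig1 : List (List (String × Int))), pvBuild sig2 sig1 = none →
    ∀ (start : List (List Int)), (sig1.map (pvPositions sig2)).foldl pvStep start = [] := by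
  intro sig1
  induction sig1 with
  | nil => intro h; simp [pvBuild] at h
  | cons sig rest ih =>
    intro h start
    simp only [pvBuild] at h
    by_cases he : (pvPositions sig2 sig).isEmpty = true
    · have : pvPositions sig2 sig = [] := by simpa [List.isEmpty_iff] using he
      simp only [List.map_cons, List.foldl_cons, this, pvStep_nil_right]
      exact foldl_pvStep_nil _
    · simp only [he, Bool.false_eq_true, ite_false] at h
      cases hr : pvBuild sig2 rest with
      | none => simp only [List.map_cons, List.foldl_cons]; exact ih hr _
      | some pq => rw [hr] at h; simp at h

-- ===== VERDICT (by name: the statement is the Claim_ definition above) =====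
theorem generate_candidate_perms_spec : Claim_equal_generate_candidate_perms := by
  intro sig1 sig2 _
  show generate_candidate_perms sig1 sig2 = generate_candidate_perms_alt sig1 sig2
  unfold generate_candidate_perms generate_candidate_perms_alt
  rw [alt_eq_foldl]
  cases hb : pvBuild sig2 sig1 with
  | none => rw [build_none sig2 sig1 hb [[]]]
  | some pp =>
    show pvBacktrack pp [] PySem.Set.empty = _
    rw [pvBacktrack_eq_foldl pp [] PySem.Set.empty (by intro c; rfl), build_some sig2 sig1 pp hb]
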